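-- pv_equiv track=rewrite | github.com/fotstrt/text_classification | lstm/sentiment.py | segmentate_data
-- ===== SOURCE A (Python) =====
-- def segmentate_data(x_data, y_data):
--
--     x_dict = dict()
--     y_dict = dict()
--
--     for x, y in zip(x_data, y_data):
--         key = len(x)
--         if key not in x_dict:
--             x_dict[key] = list()
--             y_dict[key] = list()
--
--         x_dict[key].append(x)
--         y_dict[key].append(y)
--
--     return x_dict, y_dict
-- ===== SOURCE B (Python) =====
-- def segmentate_data(x_data, y_data):
--     pairs = list(zip(x_data, y_data))
--     keys = list(dict.fromkeys(len(x) for x, _ in pairs))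
--     x_dict = {k: [x for x, _ in pairs if len(x) == k] for k in keys}
--     y_dict = {k: [y for x, y in pairs if len(x) == k] for k in keys}
--     return x_dict, y_dict
-- ===== Notes on version B (the rewrite author's own statement) =====
-- stated objective: alternative
-- what changed: B replaces A's incremental two-dict bucketing loop with a two-phase decomposition: first dedup the lengths in first-occurrence order, then build each dict by a per-key filter comprehension over the zipped pairs.
import Mathlib
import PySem

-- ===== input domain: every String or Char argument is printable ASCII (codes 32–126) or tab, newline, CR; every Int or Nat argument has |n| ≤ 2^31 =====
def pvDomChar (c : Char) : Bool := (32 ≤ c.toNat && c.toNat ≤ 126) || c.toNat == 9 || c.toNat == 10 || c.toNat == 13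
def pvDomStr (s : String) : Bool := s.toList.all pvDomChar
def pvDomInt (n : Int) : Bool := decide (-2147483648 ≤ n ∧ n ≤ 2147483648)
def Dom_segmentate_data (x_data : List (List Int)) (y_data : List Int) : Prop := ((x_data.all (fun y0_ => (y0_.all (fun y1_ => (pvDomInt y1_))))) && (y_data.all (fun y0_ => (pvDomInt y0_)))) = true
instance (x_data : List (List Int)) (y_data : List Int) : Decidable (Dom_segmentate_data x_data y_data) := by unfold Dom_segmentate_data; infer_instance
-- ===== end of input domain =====

-- B groups the pairs by first dedup-ing the lengths (first-occurrence order) and then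
-- building each dict entry by a per-key filter over the zipped pairs, instead of A's
-- incremental two-dict bucketing loop; same return value, objective: alternative.

-- ===== PORT A =====
-- one iteration of A's 'for x, y in zip(...)' loop over the pair of dicts
def segStepA (st : PySem.Dict Int (List (List Int)) × PySem.Dict Int (List Int))
    (p : List Int × Int) :
    PySem.Dict Int (List (List Int)) × PySem.Dict Int (List Int) :=
  let key : Int := (p.1.length : Int)
  let st' :=
    if st.1.contains key then st
    else (st.1.insert key [], st.2.insert key [])
  (st'.1.modify key [] (fun v => v ++ [p.1]), st'.2.modify key [] (fun v => v ++ [p.2]))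

def segmentate_data (x_data : List (List Int)) (y_data : List Int) :
    (List (Int × List (List Int))) × (List (Int × List Int)) :=
  let st := (x_data.zip y_data).foldl segStepA (PySem.Dict.empty, PySem.Dict.empty)
  (st.1.items, st.2.items)

-- ===== PORT B =====
def segmentate_data_alt (x_data : List (List Int)) (y_data : List Int) :
    (List (Int × List (List Int))) × (List (Int × List Int)) :=
  let pairs := x_data.zip y_data
  let keys := PySem.List.dedup (pairs.map (fun p => (p.1.length : Int)))
  ( keys.map (fun k => (k, (pairs.filter (fun p => (p.1.length : Int) == k)).map (fun p => p.1))),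
    keys.map (fun k => (k, (pairs.filter (fun p => (p.1.length : Int) == k)).map (fun p => p.2))) )

-- ===== PRECONDITION & SPEC =====
def Spec_segmentate_data (x_data : List (List Int)) (y_data : List Int) (out : (List (Int × List (List Int))) × (List (Int × List Int))) : Prop := out = segmentate_data_alt x_data y_data
instance (x_data : List (List Int)) (y_data : List Int) (out : (List (Int × List (List Int))) × (List (Int × List Int))) : Decidable (Spec_segmentate_data x_data y_data out) := by unfold Spec_segmentate_data; infer_instance

-- ===== CLAIM (what is proved, stated in full; the proofs are below) =====
def Claim_equal_segmentate_data : Prop := ∀ (x_data : List (List Int)) (y_data : List Int), Dom_segmentate_data x_data y_data → Spec_segmentate_data x_data y_data (segmentate_data x_data y_data)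

-- ===== LEMMAS AND PROOFS =====

-- inserting a fresh key with the default and then modifying it is just modifying it
theorem insert_then_modify {ν : Type} (d : PySem.Dict Int ν) (k : Int) (d0 : ν) (f : ν → ν)
    (h : d.contains k = false) :
    (d.insert k d0).modify k d0 f = d.modify k d0 f := by
  unfold PySem.Dict.modify
  rw [PySem.Dict.getD_insert_self, PySem.Dict.insert_insert_self,
      PySem.Dict.getD_of_not_contains d d0 h]

def segG1 (d : PySem.Dict Int (List (List Int))) (p : List Int × Int) :
    PySem.Dict Int (List (List Int)) :=
  d.modify (p.1.length : Int) [] (fun v => v ++ [p.1])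

def segG2 (d : PySem.Dict Int (List Int)) (p : List Int × Int) :
    PySem.Dict Int (List Int) :=
  d.modify (p.1.length : Int) [] (fun v => v ++ [p.2])

theorem keys_segG1_segG2 (d1 : PySem.Dict Int (List (List Int))) (d2 : PySem.Dict Int (List Int))
    (p : List Int × Int) (h : d1.keys = d2.keys) :
    (segG1 d1 p).keys = (segG2 d2 p).keys := by
  have hc : d1.contains (p.1.length : Int) = d2.contains (p.1.length : Int) := by
    rw [PySem.Dict.contains_eq_decide_mem_keys, PySem.Dict.contains_eq_decide_mem_keys, h]
  unfold segG1 segG2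
  rw [PySem.Dict.keys_modify, PySem.Dict.keys_modify]
  by_cases hk : d1.contains (p.1.length : Int) = true
  · rw [PySem.Dict.keys_insert_of_contains _ _ hk,
        PySem.Dict.keys_insert_of_contains _ _ (hc ▸ hk), h]
  · have hk1 : d1.contains (p.1.length : Int) = false := by simpa using hk
    rw [PySem.Dict.keys_insert_of_not_contains _ _ hk1,
        PySem.Dict.keys_insert_of_not_contains _ _ (hc ▸ hk1), h]

theorem stepA_eq (d1 : PySem.Dict Int (List (List Int))) (d2 : PySem.Dict Int (List Int))
    (p : List Int × Int) (h : d1.keys = d2.keys) :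
    segStepA (d1, d2) p = (segG1 d1 p, segG2 d2 p) := by
  have hc : d1.contains (p.1.length : Int) = d2.contains (p.1.length : Int) := by
    rw [PySem.Dict.contains_eq_decide_mem_keys, PySem.Dict.contains_eq_decide_mem_keys, h]
  unfold segStepA segG1 segG2
  by_cases hk : d1.contains (p.1.length : Int) = true
  · simp [hk]
  · have hk1 : d1.contains (p.1.length : Int) = false := by simpa using hk
    have hk2 : d2.contains (p.1.length : Int) = false := hc ▸ hk1
    simp only [hk1, Bool.false_eq_true, if_false]
    rw [insert_then_modify d1 _ _ _ hk1, insert_then_modify d2 _ _ _ hk2]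

-- A's combined fold over the pair of dicts splits into two independent modify-folds
theorem fold_split (l : List (List Int × Int)) (d1 : PySem.Dict Int (List (List Int)))
    (d2 : PySem.Dict Int (List Int)) (h : d1.keys = d2.keys) :
    l.foldl segStepA (d1, d2) = (l.foldl segG1 d1, l.foldl segG2 d2) := by
  induction l generalizing d1 d2 with
  | nil => rfl
  | cons p l ih =>
      simp only [List.foldl_cons]
      rw [stepA_eq d1 d2 p h]
      exact ih _ _ (keys_segG1_segG2 d1 d2 p h)

theorem getD_fold_segG1 (l : List (List Int × Int)) (c : Int) :
    (l.foldl segG1 PySem.Dict.empty).getD c [] =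
      (l.filter (fun p => (p.1.length : Int) == c)).map (fun p => p.1) := by
  have h := PySem.Dict.getD_foldl_modify_append
      (l.map (fun p : List Int × Int => ((p.1.length : Int), p.1))) PySem.Dict.empty c
  rw [List.foldl_map] at h
  simpa [segG1, List.filter_map, Function.comp] using h

theorem getD_fold_segG2 (l : List (List Int × Int)) (c : Int) :
    (l.foldl segG2 PySem.Dict.empty).getD c [] =
      (l.filter (fun p => (p.1.length : Int) == c)).map (fun p => p.2) := by
  have h := PySem.Dict.getD_foldl_modify_append
      (l.map (fun p : List Int × Int => ((p.1.length : Int), p.2))) PySem.Dict.empty c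
  rw [List.foldl_map] at h
  simpa [segG2, List.filter_map, Function.comp] using h

theorem keys_fold_segG1 (l : List (List Int × Int)) :
    (l.foldl segG1 PySem.Dict.empty).keys =
      PySem.List.dedup (l.map (fun p => (p.1.length : Int))) := by
  have h := PySem.Dict.keys_foldl_modify_key l (fun p : List Int × Int => (p.1.length : Int))
      ([] : List (List Int)) (fun _ p v => v ++ [p.1]) PySem.Dict.empty
  simpa [segG1, PySem.List.dedup_eq_ofList, PySem.Set.update_nil_left] using h

theorem keys_fold_segG2 (l : List (List Int × Int)) :
    (l.foldl segG2 PySem.Dict.empty).keys =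
      PySem.List.dedup (l.map (fun p => (p.1.length : Int))) := by
  have h := PySem.Dict.keys_foldl_modify_key l (fun p : List Int × Int => (p.1.length : Int))
      ([] : List Int) (fun _ p v => v ++ [p.2]) PySem.Dict.empty
  simpa [segG2, PySem.List.dedup_eq_ofList, PySem.Set.update_nil_left] using h

theorem nodup_fold_segG1 (l : List (List Int × Int)) :
    (l.foldl segG1 PySem.Dict.empty).keys.Nodup := by
  exact PySem.Dict.nodup_keys_foldl_modify_key l (fun p : List Int × Int => (p.1.length : Int))
      ([] : List (List Int)) (fun _ p v => v ++ [p.1]) PySem.Dict.empty (by simp)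

theorem nodup_fold_segG2 (l : List (List Int × Int)) :
    (l.foldl segG2 PySem.Dict.empty).keys.Nodup := by
  exact PySem.Dict.nodup_keys_foldl_modify_key l (fun p : List Int × Int => (p.1.length : Int))
      ([] : List Int) (fun _ p v => v ++ [p.2]) PySem.Dict.empty (by simp)

-- ===== VERDICT (by name: the statement is the Claim_ definition above) =====
theorem segmentate_data_spec : Claim_equal_segmentate_data := by
  intro x_data y_data _
  unfold Spec_segmentate_data segmentate_data segmentate_data_alt
  dsimp only
  rw [fold_split (x_data.zip y_data) PySem.Dict.empty PySem.Dict.empty rfl]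
  refine Prod.ext ?_ ?_
  · rw [PySem.Dict.items_eq_map_keys _ (nodup_fold_segG1 _) ([] : List (List Int)),
        keys_fold_segG1]
    simp only [getD_fold_segG1]
  · rw [PySem.Dict.items_eq_map_keys _ (nodup_fold_segG2 _) ([] : List Int),
        keys_fold_segG2]
    simp only [getD_fold_segG2]
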